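-- pv_equiv track=rewrite | github.com/OlgaVysh/Orienting_complete_graphs | AlteBAs/Orient-Planar-Graphs/GreedyOrientation.py | can_form_cycle_dfs
-- ===== SOURCE A (Python) =====
-- def can_form_cycle_dfs(polygon, edge_vars, edge_index, edges):
--     """
--     Perform a DFS to check if a cycle can be formed for a polygon by traversing
--     its edges in two possible directions (clockwise and counterclockwise).
--     """
--
--     # No sorting of vertices; use the polygon as it is
--     num_vertices = len(polygon)
--
--     # Track newly oriented edges during this DFS call
--     newly_oriented_edges = []
--
--     def try_path(path):
--         """Try to traverse a specific path and see if it forms a cycle."""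
--         for (current, next_node, edge) in path:
--             # Respect the existing edge orientation
--             if edge_vars[edge] == [1, 0] and (current, next_node) == (edges[edge][1], edges[edge][0]):
--                 return False  # If orientation doesn't allow traversal
--             if edge_vars[edge] == [0, 1] and (current, next_node) == (edges[edge][0], edges[edge][1]):
--                 return False  # If orientation doesn't allow traversal
--
--             # If the edge is unoriented, orient it to allow traversal
--             if edge_vars[edge] == [0, 0]:
--                 if (current, next_node) == (edges[edge][0], edges[edge][1]):
--                     edge_vars[edge] = [1, 0]
--                 else:
--                     edge_vars[edge] = [0, 1]
--                 newly_oriented_edges.append(edge)  # Track that this edge was oriented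
--
--         return True
--
--     # Construct paths for the polygon: clockwise and counterclockwise
--     clockwise_path = []
--     counterclockwise_path = []
--     # Create the paths by connecting consecutive vertices and their edges
--     for i in range(num_vertices):
--         v1 = polygon[i]
--         v2 = polygon[(i + 1) % num_vertices]  # Wrap around to form a cycle
--         e = edge_index[tuple(sorted((v1, v2)))]  # Get the edge index
--         clockwise_path.append((v1, v2, e))
--         counterclockwise_path.append((v2, v1, e))  # Reverse direction for counterclockwise path
--
--     # Try both paths to see if any form a cycle
--     if not try_path(clockwise_path):
--         # Reset oriented edges if no cycle is found
--         for e in newly_oriented_edges: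
--             edge_vars[e] = [0, 0]
--         if not try_path(counterclockwise_path):
--             # Reset oriented edges if no cycle is found
--             for e in newly_oriented_edges:
--                 edge_vars[e] = [0, 0]
--             return False
--
--     # If a cycle was successfully formed, return True
--     return True
-- ===== SOURCE B (Python) =====
-- def can_form_cycle_dfs(polygon, edge_vars, edge_index, edges):
--     """Check-then-commit re-implementation: build the consecutive-edge step list
--     once, then ONE pure pass evaluates BOTH traversal directions simultaneously
--     against pending-orientation dicts (never touching edge_vars, so no rollback
--     is ever needed); on success the winning direction's pending orientations are
--     committed to edge_vars in a final phase."""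
--     n = len(polygon)
--     steps = []
--     for i in range(n):
--         v1, v2 = polygon[i], polygon[(i + 1) % n]
--         e = edge_index[(v1, v2) if v1 <= v2 else (v2, v1)]
--         steps.append((v1, v2, e))
--
--     def direction_step(e, a, b, x, y, val, ok, pend):
--         """Advance one direction by one step (a -> b over edge e = (x, y));
--         orientations decided so far live in pend, not in edge_vars."""
--         if not ok:
--             return False
--         v = pend.get(e, val)
--         if v == [1, 0]:
--             if (a, b) == (y, x):
--                 return False
--         elif v == [0, 1]:
--             if (a, b) == (x, y):
--                 return False
--         elif v == [0, 0]:
--             pend[e] = [1, 0] if (a, b) == (x, y) else [0, 1]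
--         return True
--
--     cw_ok = ccw_ok = True
--     pend_cw = {}
--     pend_ccw = {}
--     for c, nx, e in steps:
--         x, y = edges[e]
--         val = edge_vars[e]
--         cw_ok = direction_step(e, c, nx, x, y, val, cw_ok, pend_cw)
--         ccw_ok = direction_step(e, nx, c, x, y, val, ccw_ok, pend_ccw)
--
--     if cw_ok:
--         for e, v in pend_cw.items():
--             edge_vars[e] = v
--         return True
--     if ccw_ok:
--         for e, v in pend_ccw.items():
--             edge_vars[e] = v
--         return True
--     return False
-- ===== Notes on version B (the rewrite author's own statement) =====
-- stated objective: alternative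
-- what changed: A speculatively mutates edge_vars while trying the clockwise then the counterclockwise path, keeping an undo log to roll back on failure; B never touches edge_vars during the scan: one pure pass advances both directions simultaneously against pending-orientation dicts and a final phase commits the winning direction's orientations.
-- outside the precondition, e.g. on can_form_cycle_dfs([4], {2: [2, 2, 2, 1, 2]}, {(4, 4): 2}, [(4, 4)]): A returns True, B raises IndexError
import Mathlib
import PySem

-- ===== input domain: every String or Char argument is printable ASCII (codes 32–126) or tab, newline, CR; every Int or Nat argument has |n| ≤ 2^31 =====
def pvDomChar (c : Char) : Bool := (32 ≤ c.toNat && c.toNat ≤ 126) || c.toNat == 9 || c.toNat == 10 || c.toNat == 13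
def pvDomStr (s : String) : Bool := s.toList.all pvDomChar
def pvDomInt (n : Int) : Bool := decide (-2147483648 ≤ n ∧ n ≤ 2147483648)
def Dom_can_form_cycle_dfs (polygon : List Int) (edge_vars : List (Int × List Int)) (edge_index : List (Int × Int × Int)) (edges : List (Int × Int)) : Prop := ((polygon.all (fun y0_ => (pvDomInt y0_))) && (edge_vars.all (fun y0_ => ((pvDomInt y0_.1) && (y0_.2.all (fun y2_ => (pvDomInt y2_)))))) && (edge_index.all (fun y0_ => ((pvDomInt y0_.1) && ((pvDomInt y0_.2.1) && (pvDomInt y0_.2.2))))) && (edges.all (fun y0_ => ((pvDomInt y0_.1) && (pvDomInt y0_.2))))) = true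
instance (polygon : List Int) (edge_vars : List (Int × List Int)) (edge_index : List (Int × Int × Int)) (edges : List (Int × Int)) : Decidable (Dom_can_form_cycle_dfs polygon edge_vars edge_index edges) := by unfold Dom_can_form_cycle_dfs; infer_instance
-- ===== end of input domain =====

-- B replaces A's speculative mutate-and-rollback (two sequential tries with an undo log) by one
-- pure pass evaluating both directions at once into pending dicts plus a final commit; the
-- equivalence proved here is about the RETURN value (both Pythons leave edge_vars in the same
-- final state, but only the returned Bool is modelled).

-- shared tiny helper: both Pythons evaluate the sorted vertex pair as the edge_index key
def pvSortKey (a b : Int) : Int × Int := if a ≤ b then (a, b) else (b, a)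

def pvEdgeIndexDict (edge_index : List (Int × Int × Int)) : PySem.Dict (Int × Int) Int :=
  PySem.Dict.mk (edge_index.map (fun t => ((t.1, t.2.1), t.2.2)))

-- ===== PORT A =====
-- the path-construction for loop (two appended accumulators), then try_path over the built list
def pvBuildPaths (polygon : List Int) (n : Int) (ei : PySem.Dict (Int × Int) Int) :
    List Int → List (Int × Int × Int) → List (Int × Int × Int) →
    Option (List (Int × Int × Int) × List (Int × Int × Int))
  | [], cw, ccw => some (cw, ccw)
  | i :: rest, cw, ccw =>
    match PySem.List.pyGet? polygon i, PySem.List.pyGet? polygon (PySem.Int.mod (i + 1) n) with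
    | some v1, some v2 =>
      match ei.get? (pvSortKey v1 v2) with
      | some e => pvBuildPaths polygon n ei rest (cw ++ [(v1, v2, e)]) (ccw ++ [(v2, v1, e)])
      | none => none
    | _, _ => none

-- try_path: threads edge_vars and the newly_oriented_edges undo log; none = an exception
def pvTryPath (edge_list : List (Int × Int)) :
    List (Int × Int × Int) → PySem.Dict Int (List Int) → List Int →
    Option (Bool × PySem.Dict Int (List Int) × List Int)
  | [], ev, newly => some (true, ev, newly)
  | (c, nx, e) :: rest, ev, newly =>
    match ev.get? e with
    | none => none
    | some val =>
      if val == [1, 0] then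
        match PySem.List.pyGet? edge_list e with
        | none => none
        | some (x, y) =>
          if (c, nx) == (y, x) then some (false, ev, newly)
          else pvTryPath edge_list rest ev newly
      else if val == [0, 1] then
        match PySem.List.pyGet? edge_list e with
        | none => none
        | some (x, y) =>
          if (c, nx) == (x, y) then some (false, ev, newly)
          else pvTryPath edge_list rest ev newly
      else if val == [0, 0] then
        match PySem.List.pyGet? edge_list e with
        | none => none
        | some (x, y) =>
          pvTryPath edge_list rest (ev.insert e (if (c, nx) == (x, y) then [1, 0] else [0, 1]))
            (newly ++ [e])
      else pvTryPath edge_list rest ev newly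

def can_form_cycle_dfs (polygon : List Int) (edge_vars : List (Int × List Int)) (edge_index : List (Int × Int × Int)) (edges : List (Int × Int)) : Bool :=
  let n : Int := PySem.List.len polygon
  let ei := pvEdgeIndexDict edge_index
  let ev0 : PySem.Dict Int (List Int) := PySem.Dict.mk edge_vars
  match pvBuildPaths polygon n ei (PySem.List.pyRange 0 n 1) [] [] with
  | none => false
  | some (cw, ccw) =>
    match pvTryPath edges cw ev0 [] with
    | none => false
    | some (true, _, _) => true
    | some (false, ev1, newly) =>
      -- reset of the newly oriented edges, then the counterclockwise try
      let ev2 := newly.foldl (fun d e => d.insert e ([0, 0] : List Int)) ev1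
      match pvTryPath edges ccw ev2 newly with
      | none => false
      | some (b2, _, _) => b2

-- ===== PORT B =====
-- B builds the step list once, then ONE pure pass advances BOTH directions simultaneously
-- against pending-orientation dicts; edge_vars is never touched during the scan, so there is
-- no rollback (the Python's final commit loop only mutates edge_vars, not the return value)
def pvMkSteps (polygon : List Int) (n : Int) (ei : PySem.Dict (Int × Int) Int) :
    List Int → List (Int × Int × Int) → Option (List (Int × Int × Int))
  | [], acc => some acc
  | i :: rest, acc =>
    match PySem.List.pyGet? polygon i, PySem.List.pyGet? polygon (PySem.Int.mod (i + 1) n) with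
    | some v1, some v2 =>
      match ei.get? (pvSortKey v1 v2) with
      | some e => pvMkSteps polygon n ei rest (acc ++ [(v1, v2, e)])
      | none => none
    | _, _ => none

-- direction_step: advance one direction (a → b over edge e = (x, y)) by one step; the
-- orientations decided so far live in pend (returned alongside the flag, as Python mutates it)
def pvDirStep (e a b x y : Int) (val : List Int) (ok : Bool)
    (pend : PySem.Dict Int (List Int)) : Bool × PySem.Dict Int (List Int) :=
  if ok then
    let v := (pend.get? e).getD val
    if v == [1, 0] then (if (a, b) == (y, x) then (false, pend) else (true, pend))
    else if v == [0, 1] then (if (a, b) == (x, y) then (false, pend) else (true, pend))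
    else if v == [0, 0] then
      (true, pend.insert e (if (a, b) == (x, y) then [1, 0] else [0, 1]))
    else (true, pend)
  else (false, pend)

-- the fused scan: per step, fetch edges[e] and edge_vars[e] once, feed both directions
def pvFused (edge_list : List (Int × Int)) (ev0 : PySem.Dict Int (List Int)) :
    List (Int × Int × Int) → Bool → PySem.Dict Int (List Int) → Bool →
    PySem.Dict Int (List Int) →
    Option (Bool × PySem.Dict Int (List Int) × Bool × PySem.Dict Int (List Int))
  | [], cw, pcw, ccw, pccw => some (cw, pcw, ccw, pccw)
  | (c, nx, e) :: rest, cw, pcw, ccw, pccw =>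
    match PySem.List.pyGet? edge_list e, ev0.get? e with
    | some (x, y), some val =>
      let r1 := pvDirStep e c nx x y val cw pcw
      let r2 := pvDirStep e nx c x y val ccw pccw
      pvFused edge_list ev0 rest r1.1 r1.2 r2.1 r2.2
    | _, _ => none

def can_form_cycle_dfs_alt (polygon : List Int) (edge_vars : List (Int × List Int)) (edge_index : List (Int × Int × Int)) (edges : List (Int × Int)) : Bool :=
  let n : Int := PySem.List.len polygon
  let ei := pvEdgeIndexDict edge_index
  let ev0 : PySem.Dict Int (List Int) := PySem.Dict.mk edge_vars
  match pvMkSteps polygon n ei (PySem.List.pyRange 0 n 1) [] with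
  | none => false
  | some steps =>
    match pvFused edges ev0 steps true (PySem.Dict.mk []) true (PySem.Dict.mk []) with
    | none => false
    | some (cw, _, ccw, _) => cw || ccw

-- ===== PRECONDITION & SPEC =====
-- per polygon edge: the sorted pair is a key of edge_index, the edge number is a key of
-- edge_vars and a valid Python index into edges
def pvEdgeOK (polygon : List Int) (edge_vars : List (Int × List Int)) (edge_index : List (Int × Int × Int)) (edges : List (Int × Int)) (i : Nat) : Bool :=
  let v1 := polygon.getD i 0
  let v2 := polygon.getD ((i + 1) % polygon.length) 0
  match (pvEdgeIndexDict edge_index).get? (pvSortKey v1 v2) with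
  | none => false
  | some e => (PySem.Dict.mk edge_vars).contains e && decide (PySem.Raise.InRange edges.length e)

-- Pre_ = A raises no KeyError/IndexError (every referenced key/index valid, a little stronger
-- than A's lazy short-circuit accesses); duplicate keys in edge_vars are excluded because a
-- Python dict cannot contain them (the association list is a dict under the type convention).
def Pre_can_form_cycle_dfs (polygon : List Int) (edge_vars : List (Int × List Int)) (edge_index : List (Int × Int × Int)) (edges : List (Int × Int)) : Prop :=
  (edge_vars.map Prod.fst).Nodup ∧
  ∀ i < polygon.length, pvEdgeOK polygon edge_vars edge_index edges i = true
instance (polygon : List Int) (edge_vars : List (Int × List Int)) (edge_index : List (Int × Int × Int)) (edges : List (Int × Int)) : Decidable (Pre_can_form_cycle_dfs polygon edge_vars edge_index edges) := by unfold Pre_can_form_cycle_dfs; infer_instance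

def pvWitness_can_form_cycle_dfs : List Int × (List (Int × List Int)) × (List (Int × Int × Int)) × (List (Int × Int)) :=
  ([0, 1, 2], [(0, [0, 0]), (1, [0, 0]), (2, [0, 0])], [(0, 1, 0), (1, 2, 1), (0, 2, 2)], [(0, 1), (1, 2), (0, 2)])

def Spec_can_form_cycle_dfs (polygon : List Int) (edge_vars : List (Int × List Int)) (edge_index : List (Int × Int × Int)) (edges : List (Int × Int)) (out : Bool) : Prop := out = can_form_cycle_dfs_alt polygon edge_vars edge_index edges
instance (polygon : List Int) (edge_vars : List (Int × List Int)) (edge_index : List (Int × Int × Int)) (edges : List (Int × Int)) (out : Bool) : Decidable (Spec_can_form_cycle_dfs polygon edge_vars edge_index edges out) := by unfold Spec_can_form_cycle_dfs; infer_instance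

-- ===== CLAIM (what is proved, stated in full; the proofs are below) =====
def Claim_equal_can_form_cycle_dfs : Prop := ∀ (polygon : List Int) (edge_vars : List (Int × List Int)) (edge_index : List (Int × Int × Int)) (edges : List (Int × Int)), Dom_can_form_cycle_dfs polygon edge_vars edge_index edges → Pre_can_form_cycle_dfs polygon edge_vars edge_index edges → Spec_can_form_cycle_dfs polygon edge_vars edge_index edges (can_form_cycle_dfs polygon edge_vars edge_index edges)

-- ===== LEMMAS AND PROOFS =====

-- proof-only total readbacks of the per-index fetches
def pvV1 (polygon : List Int) (i : Int) : Int := (PySem.List.pyGet? polygon i).getD 0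
def pvV2 (polygon : List Int) (n i : Int) : Int :=
  (PySem.List.pyGet? polygon (PySem.Int.mod (i + 1) n)).getD 0
def pvE (polygon : List Int) (n : Int) (ei : PySem.Dict (Int × Int) Int) (i : Int) : Int :=
  (ei.get? (pvSortKey (pvV1 polygon i) (pvV2 polygon n i))).getD 0

-- per-index condition: all three fetches succeed, the edge is a valid index and a dict key
def pvCondF (polygon : List Int) (n : Int) (ei : PySem.Dict (Int × Int) Int)
    (edges : List (Int × Int)) (i : Int) : Prop :=
  (PySem.List.pyGet? polygon i).isSome = true ∧
  (PySem.List.pyGet? polygon (PySem.Int.mod (i + 1) n)).isSome = true ∧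
  (ei.get? (pvSortKey (pvV1 polygon i) (pvV2 polygon n i))).isSome = true ∧
  PySem.Raise.InRange edges.length (pvE polygon n ei i)

-- per-step condition for the fused scan: edges[e] and edge_vars[e] both exist
def pvCondS (edge_list : List (Int × Int)) (ev0 : PySem.Dict Int (List Int))
    (steps : List (Int × Int × Int)) : Prop :=
  ∀ s ∈ steps, (PySem.List.pyGet? edge_list s.2.2).isSome = true ∧
    (ev0.get? s.2.2).isSome = true

-- overlay invariant: the threaded dict of try_path = the pending dict over the snapshot
def pvOv (ev0 pend ev : PySem.Dict Int (List Int)) : Prop :=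
  ∀ k, ev.get? k = match pend.get? k with | some v => some v | none => ev0.get? k

-- proof-only single-direction projection of the fused scan
def pvDirRun (edge_list : List (Int × Int)) (ev0 : PySem.Dict Int (List Int)) (flip : Bool) :
    List (Int × Int × Int) → Bool → PySem.Dict Int (List Int) →
    Option (Bool × PySem.Dict Int (List Int))
  | [], ok, pend => some (ok, pend)
  | (c, nx, e) :: rest, ok, pend =>
    match PySem.List.pyGet? edge_list e, ev0.get? e with
    | some (x, y), some val =>
      let r := pvDirStep e (if flip then nx else c) (if flip then c else nx) x y val ok pend
      pvDirRun edge_list ev0 flip rest r.1 r.2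
    | _, _ => none

theorem pvOpt_eq_some_getD {α : Type} (o : Option α) (d : α) (h : o.isSome = true) :
    o = some (o.getD d) := by cases o <;> simp_all

-- the fused scan is exactly the pair of its two direction projections
theorem pvFused_eq_pair (edge_list : List (Int × Int)) (ev0 : PySem.Dict Int (List Int))
    (steps : List (Int × Int × Int)) :
    ∀ cw pcw ccw pccw b1 p1 b2 p2,
      pvDirRun edge_list ev0 false steps cw pcw = some (b1, p1) →
      pvDirRun edge_list ev0 true steps ccw pccw = some (b2, p2) →
      pvFused edge_list ev0 steps cw pcw ccw pccw = some (b1, p1, b2, p2) := by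
  induction steps with
  | nil =>
    intro cw pcw ccw pccw b1 p1 b2 p2 h1 h2
    simp only [pvDirRun, Option.some.injEq, Prod.mk.injEq] at h1 h2
    simp [pvFused, h1.1, h1.2, h2.1, h2.2]
  | cons t rest ih =>
    obtain ⟨c, nx, e⟩ := t
    intro cw pcw ccw pccw b1 p1 b2 p2 h1 h2
    simp only [pvDirRun] at h1 h2
    simp only [pvFused]
    rcases hx : PySem.List.pyGet? edge_list e with _ | ⟨x, y⟩ <;> rw [hx] at h1 h2
    · exact absurd h1 (by simp)
    rcases hv : ev0.get? e with _ | val <;> rw [hv] at h1 h2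
    · exact absurd h1 (by simp)
    exact ih _ _ _ _ _ _ _ _ h1 h2

-- a direction that has already failed stays failed with a frozen pending dict
theorem pvDirRun_frozen (edge_list : List (Int × Int)) (ev0 : PySem.Dict Int (List Int))
    (flip : Bool) (steps : List (Int × Int × Int)) (pend : PySem.Dict Int (List Int))
    (hc : pvCondS edge_list ev0 steps) :
    pvDirRun edge_list ev0 flip steps false pend = some (false, pend) := by
  induction steps with
  | nil => rfl
  | cons t rest ih =>
    obtain ⟨c, nx, e⟩ := t
    obtain ⟨he, hv⟩ := hc (c, nx, e) List.mem_cons_self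
    rcases hx : PySem.List.pyGet? edge_list e with _ | ⟨x, y⟩
    · rw [hx] at he; exact absurd he (by simp)
    rcases hval : ev0.get? e with _ | val
    · rw [hval] at hv; exact absurd hv (by simp)
    simp only [pvDirRun, hx, hval, pvDirStep, Bool.false_eq_true, if_false]
    exact ih (fun s hs => hc s (List.mem_cons_of_mem _ hs))

-- main simulation: try_path on the (possibly flipped) step list both RETURNS and agrees with
-- the pure direction run over the pending overlay
theorem pvTry_eq_dirRun (edge_list : List (Int × Int)) (ev0 : PySem.Dict Int (List Int))
    (flip : Bool) (steps : List (Int × Int × Int)) :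
    ∀ ev pend newly, pvOv ev0 pend ev → pvCondS edge_list ev0 steps →
    ∃ b ev1 n1 pend',
      pvTryPath edge_list
        (steps.map (fun s => if flip then (s.2.1, s.1, s.2.2) else s)) ev newly
        = some (b, ev1, n1) ∧
      pvDirRun edge_list ev0 flip steps true pend = some (b, pend') := by
  induction steps with
  | nil => exact fun ev pend newly _ _ => ⟨true, ev, newly, pend, rfl, rfl⟩
  | cons t rest ih =>
    obtain ⟨c, nx, e⟩ := t
    intro ev pend newly hOv hc
    obtain ⟨he, hval⟩ := hc (c, nx, e) List.mem_cons_self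
    have hcr : pvCondS edge_list ev0 rest := fun s hs => hc s (List.mem_cons_of_mem _ hs)
    rcases hx : PySem.List.pyGet? edge_list e with _ | ⟨x, y⟩
    · rw [hx] at he; exact absurd he (by simp)
    rcases hv0 : ev0.get? e with _ | val0
    · rw [hv0] at hval; exact absurd hval (by simp)
    -- the threaded dict's value at e is the overlay value
    have hev : ev.get? e = some ((pend.get? e).getD val0) := by
      have := hOv e
      rcases hp : pend.get? e with _ | w <;> rw [hp] at this <;> simp [this, hv0]
    have hmap : (((c, nx, e) :: rest).map (fun s => if flip then (s.2.1, s.1, s.2.2) else s)) =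
        (if flip then nx else c, if flip then c else nx, e) ::
          rest.map (fun s => if flip then (s.2.1, s.1, s.2.2) else s) := by
      cases flip <;> simp
    rw [hmap]
    simp only [pvTryPath, hev, pvDirRun, hx, hv0, pvDirStep, if_true]
    generalize (pend.get? e).getD val0 = v
    generalize (if flip = true then nx else c) = a
    generalize (if flip = true then c else nx) = b
    by_cases h10 : v = [1, 0]
    · rw [h10]
      simp only [BEq.rfl, if_true]
      by_cases hyx : (a, b) = (y, x)
      · simp only [hyx, BEq.rfl, if_true]
        exact ⟨false, ev, newly, pend, rfl,
          pvDirRun_frozen edge_list ev0 flip rest pend hcr⟩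
      · simp only [show (((a, b).1, (a, b).2) == (y, x)) = false by simpa using hyx,
          Bool.false_eq_true, if_false]
        exact ih ev pend newly hOv hcr
    · by_cases h01 : v = [0, 1]
      · rw [h01]
        simp only [show (([0, 1] : List Int) == [1, 0]) = false by decide, BEq.rfl,
          Bool.false_eq_true, if_false, if_true]
        by_cases hxy : (a, b) = (x, y)
        · simp only [hxy, BEq.rfl, if_true]
          exact ⟨false, ev, newly, pend, rfl,
            pvDirRun_frozen edge_list ev0 flip rest pend hcr⟩
        · simp only [show (((a, b).1, (a, b).2) == (x, y)) = false by simpa using hxy,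
            Bool.false_eq_true, if_false]
          exact ih ev pend newly hOv hcr
      · by_cases h00 : v = [0, 0]
        · rw [h00]
          simp only [show (([0, 0] : List Int) == [1, 0]) = false by decide,
            show (([0, 0] : List Int) == [0, 1]) = false by decide, BEq.rfl,
            Bool.false_eq_true, if_false, if_true]
          have hOv' : pvOv ev0
              (pend.insert e (if ((a, b) == (x, y)) = true then [1, 0] else [0, 1]))
              (ev.insert e (if ((a, b) == (x, y)) = true then [1, 0] else [0, 1])) := by
            intro k
            by_cases hk : k = e
            · subst hk
              rw [PySem.Dict.get?_insert_self, PySem.Dict.get?_insert_self]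
            · rw [PySem.Dict.get?_insert_of_ne _ _ hk, PySem.Dict.get?_insert_of_ne _ _ hk]
              exact hOv k
          exact ih _ _ (newly ++ [e]) hOv' hcr
        · simp only [show (v == [1, 0]) = false by simpa using h10,
            show (v == [0, 1]) = false by simpa using h01,
            show (v == [0, 0]) = false by simpa using h00, Bool.false_eq_true, if_false]
          exact ih ev pend newly hOv hcr

theorem pvInsert_comm {ν : Type} (d : PySem.Dict Int ν) (k k' : Int) (v v' : ν)
    (hk : d.contains k = true) (hk' : d.contains k' = true) (hne : k ≠ k') :
    (d.insert k v).insert k' v' = (d.insert k' v').insert k v := by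
  apply PySem.Dict.ext
  have h1 : (d.insert k v).contains k' = true := by
    rw [PySem.Dict.contains_insert]; simp [hk']
  have h2 : (d.insert k' v').contains k = true := by
    rw [PySem.Dict.contains_insert]; simp [hk]
  rw [PySem.Dict.items_insert_of_contains _ v' h1, PySem.Dict.items_insert_of_contains _ v hk,
      PySem.Dict.items_insert_of_contains _ v h2, PySem.Dict.items_insert_of_contains _ v' hk',
      List.map_map, List.map_map]
  apply List.map_congr_left
  intro p _
  by_cases hpk : p.1 = k
  · simp [Function.comp, hpk, hne]
  · by_cases hpk' : p.1 = k' <;> simp [Function.comp, hpk, hpk', Ne.symm hne]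

theorem pvInsert_eq_self {ν : Type} (d : PySem.Dict Int ν) (k : Int) (v : ν)
    (hnd : d.keys.Nodup) (h : d.get? k = some v) : d.insert k v = d := by
  have hc : d.contains k = true := by
    rw [PySem.Dict.contains_eq_isSome_get?, h]; rfl
  apply PySem.Dict.ext
  rw [PySem.Dict.items_insert_of_contains _ v hc]
  have hcg : ∀ p ∈ d.items, (if (p.1 == k) = true then (k, v) else p) = p := by
    intro p hp
    by_cases hpk : p.1 = k
    · have hg : d.get? p.1 = some p.2 := PySem.Dict.get?_of_mem_items d hp hnd
      rw [hpk, h] at hg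
      have : p.2 = v := by injection hg.symm
      simp [hpk, ← this, Prod.ext_iff]
    · simp [hpk]
  calc (d.items.map fun p => if (p.1 == k) = true then (k, v) else p) = d.items.map id :=
        List.map_congr_left hcg
    _ = d.items := List.map_id _

theorem pvReset_insert_comm (Δ : List Int) (d : PySem.Dict Int (List Int)) (e : Int)
    (v : List Int) (he : d.contains e = true) (hΔ : ∀ k ∈ Δ, d.contains k = true)
    (hnot : e ∉ Δ) :
    Δ.foldl (fun d k => d.insert k ([0, 0] : List Int)) (d.insert e v) =
      (Δ.foldl (fun d k => d.insert k ([0, 0] : List Int)) d).insert e v := by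
  induction Δ generalizing d with
  | nil => rfl
  | cons a Δ' ih =>
    simp only [List.foldl_cons]
    have hae : e ≠ a := fun h => hnot (h ▸ List.mem_cons_self)
    rw [pvInsert_comm d e a v [0, 0] he (hΔ a List.mem_cons_self) hae]
    exact ih (d.insert a [0, 0])
      (by rw [PySem.Dict.contains_insert]; simp [he])
      (fun k hk => by rw [PySem.Dict.contains_insert]; simp [hΔ k (List.mem_cons_of_mem a hk)])
      (fun h => hnot (List.mem_cons_of_mem a h))

-- keys are invariant through try_path (every insert is at an existing key)
theorem pvTryPath_keys (edge_list : List (Int × Int)) (path : List (Int × Int × Int))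
    (ev ev1 : PySem.Dict Int (List Int)) (newly n1 : List Int) (b : Bool)
    (h : pvTryPath edge_list path ev newly = some (b, ev1, n1)) : ev1.keys = ev.keys := by
  induction path generalizing ev newly with
  | nil => simp only [pvTryPath, Option.some.injEq, Prod.mk.injEq] at h; rw [h.2.1]
  | cons t rest ih =>
    obtain ⟨c, nx, e⟩ := t
    simp only [pvTryPath] at h
    split at h
    next => exact absurd h (by simp)
    next val hg =>
      have hc : ev.contains e = true := by rw [PySem.Dict.contains_eq_isSome_get?, hg]; rfl
      split_ifs at h with h1 h2 h3
      · split at h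
        next => exact absurd h (by simp)
        next x y hxy =>
          split_ifs at h with h4
          · simp only [Option.some.injEq, Prod.mk.injEq] at h; rw [h.2.1]
          · exact ih ev newly h
      · split at h
        next => exact absurd h (by simp)
        next x y hxy =>
          split_ifs at h with h4
          · simp only [Option.some.injEq, Prod.mk.injEq] at h; rw [h.2.1]
          · exact ih ev newly h
      · split at h
        next => exact absurd h (by simp)
        next x y hxy =>
          have := ih _ _ h
          rw [this, PySem.Dict.keys_insert_of_contains _ _ hc]
      · exact ih ev newly h

-- a failed (or finished) try_path can be undone: resetting the newly oriented edges to
-- [0,0] restores the dictionary it started from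
theorem pvTryPath_reset (edge_list : List (Int × Int)) (path : List (Int × Int × Int))
    (ev ev1 : PySem.Dict Int (List Int)) (newly n1 : List Int) (b : Bool)
    (hnd : ev.keys.Nodup) (h : pvTryPath edge_list path ev newly = some (b, ev1, n1)) :
    ∃ Δ, n1 = newly ++ Δ ∧ (∀ k ∈ Δ, ev.get? k = some [0, 0]) ∧
      Δ.foldl (fun d k => d.insert k ([0, 0] : List Int)) ev1 = ev := by
  induction path generalizing ev newly with
  | nil =>
    simp only [pvTryPath, Option.some.injEq, Prod.mk.injEq] at h
    exact ⟨[], by simp [h.2.2.symm], by simp, by simp [h.2.1]⟩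
  | cons t rest ih =>
    obtain ⟨c, nx, e⟩ := t
    simp only [pvTryPath] at h
    split at h
    next => exact absurd h (by simp)
    next val hg =>
      split_ifs at h with h1 h2 h3
      · split at h
        next => exact absurd h (by simp)
        next x y hxy =>
          split_ifs at h with h4
          · simp only [Option.some.injEq, Prod.mk.injEq] at h
            exact ⟨[], by simp [h.2.2.symm], by simp, by simp [h.2.1]⟩
          · exact ih ev newly hnd h
      · split at h
        next => exact absurd h (by simp)
        next x y hxy =>
          split_ifs at h with h4
          · simp only [Option.some.injEq, Prod.mk.injEq] at h
            exact ⟨[], by simp [h.2.2.symm], by simp, by simp [h.2.1]⟩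
          · exact ih ev newly hnd h
      · split at h
        next => exact absurd h (by simp)
        next x y hxy =>
          have hval : val = [0, 0] := by simpa using h3
          have hgval : ev.get? e = some [0, 0] := hval ▸ hg
          set vnew : List Int := if ((c, nx) == (x, y)) = true then [1, 0] else [0, 1] with hvnew
          have hvnew_ne : vnew ≠ [0, 0] := by rw [hvnew]; split <;> simp
          have hnd' : (ev.insert e vnew).keys.Nodup := PySem.Dict.nodup_keys_insert _ _ _ hnd
          obtain ⟨Δ', hn1, hvals, hreset⟩ := ih (ev.insert e vnew) (newly ++ [e]) hnd' h
          have hge' : (ev.insert e vnew).get? e = some vnew := PySem.Dict.get?_insert_self _ _ _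
          have he_notin : e ∉ Δ' := by
            intro hmem
            have h0 := hvals e hmem
            rw [hge'] at h0
            exact hvnew_ne (by injection h0)
          have hkeys : _ = (ev.insert e vnew).keys := pvTryPath_keys _ _ _ _ _ _ _ h
          have hcont1 : ev1.contains e = true := by
            rw [PySem.Dict.contains_iff_mem_keys, hkeys,
              ← PySem.Dict.contains_iff_mem_keys, PySem.Dict.contains_eq_isSome_get?, hge']
            rfl
          have hcontΔ : ∀ k ∈ Δ', ev1.contains k = true := by
            intro k hk
            rw [PySem.Dict.contains_iff_mem_keys, hkeys, ← PySem.Dict.contains_iff_mem_keys,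
              PySem.Dict.contains_eq_isSome_get?, hvals k hk]
            rfl
          refine ⟨e :: Δ', by simp [hn1], ?_, ?_⟩
          · intro k hk
            rcases List.mem_cons.mp hk with hk | hk
            · exact hk ▸ hgval
            · have hke : k ≠ e := fun he => he_notin (he ▸ hk)
              have := hvals k hk
              rwa [PySem.Dict.get?_insert_of_ne _ _ hke] at this
          · have hstep : (e :: Δ').foldl (fun d k => d.insert k ([0, 0] : List Int)) ev1 =
                Δ'.foldl (fun d k => d.insert k ([0, 0] : List Int)) (ev1.insert e [0, 0]) := rfl
            rw [hstep, pvReset_insert_comm Δ' ev1 e [0, 0] hcont1 hcontΔ he_notin, hreset,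
              PySem.Dict.insert_insert_self]
            exact pvInsert_eq_self ev e [0, 0] hnd hgval
      · exact ih ev newly hnd h

-- A's path construction produces the two mapped lists
theorem pvBuild_spec (polygon : List Int) (n : Int) (ei : PySem.Dict (Int × Int) Int)
    (edges : List (Int × Int)) (l : List Int) (cw ccw : List (Int × Int × Int))
    (hc : ∀ i ∈ l, pvCondF polygon n ei edges i) :
    pvBuildPaths polygon n ei l cw ccw =
      some (cw ++ l.map (fun i => (pvV1 polygon i, pvV2 polygon n i, pvE polygon n ei i)),
            ccw ++ l.map (fun i => (pvV2 polygon n i, pvV1 polygon i, pvE polygon n ei i))) := by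
  induction l generalizing cw ccw with
  | nil => simp [pvBuildPaths]
  | cons i rest ih =>
    obtain ⟨hv1, hv2, he, _⟩ := hc i List.mem_cons_self
    have e1 : PySem.List.pyGet? polygon i = some (pvV1 polygon i) := pvOpt_eq_some_getD _ 0 hv1
    have e2 : PySem.List.pyGet? polygon (PySem.Int.mod (i + 1) n) = some (pvV2 polygon n i) :=
      pvOpt_eq_some_getD _ 0 hv2
    have e3 : ei.get? (pvSortKey (pvV1 polygon i) (pvV2 polygon n i)) = some (pvE polygon n ei i) :=
      pvOpt_eq_some_getD _ 0 he
    simp only [pvBuildPaths, e1, e2, e3]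
    rw [ih _ _ (fun j hj => hc j (List.mem_cons_of_mem i hj))]
    simp

-- B's step construction produces the clockwise mapped list
theorem pvMkSteps_spec (polygon : List Int) (n : Int) (ei : PySem.Dict (Int × Int) Int)
    (edges : List (Int × Int)) (l : List Int) (acc : List (Int × Int × Int))
    (hc : ∀ i ∈ l, pvCondF polygon n ei edges i) :
    pvMkSteps polygon n ei l acc =
      some (acc ++ l.map (fun i => (pvV1 polygon i, pvV2 polygon n i, pvE polygon n ei i))) := by
  induction l generalizing acc with
  | nil => simp [pvMkSteps]
  | cons i rest ih =>
    obtain ⟨hv1, hv2, he, _⟩ := hc i List.mem_cons_self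
    have e1 : PySem.List.pyGet? polygon i = some (pvV1 polygon i) := pvOpt_eq_some_getD _ 0 hv1
    have e2 : PySem.List.pyGet? polygon (PySem.Int.mod (i + 1) n) = some (pvV2 polygon n i) :=
      pvOpt_eq_some_getD _ 0 hv2
    have e3 : ei.get? (pvSortKey (pvV1 polygon i) (pvV2 polygon n i)) = some (pvE polygon n ei i) :=
      pvOpt_eq_some_getD _ 0 he
    simp only [pvMkSteps, e1, e2, e3]
    rw [ih _ (fun j hj => hc j (List.mem_cons_of_mem i hj))]
    simp

-- ===== VERDICT (by name: the statement is the Claim_ definition above) =====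
theorem can_form_cycle_dfs_spec : Claim_equal_can_form_cycle_dfs := by
  intro polygon edge_vars edge_index edges _hDom hPre
  obtain ⟨hnodup, hOK⟩ := hPre
  unfold Spec_can_form_cycle_dfs
  have hnd0 : (PySem.Dict.mk edge_vars).keys.Nodup := by
    rw [PySem.Dict.keys_mk]; exact hnodup
  have Hcond : ∀ i ∈ PySem.List.pyRange 0 (PySem.List.len polygon) 1,
      pvCondF polygon (PySem.List.len polygon) (pvEdgeIndexDict edge_index) edges i ∧
      (PySem.Dict.mk edge_vars).contains
        (pvE polygon (PySem.List.len polygon) (pvEdgeIndexDict edge_index) i) = true := by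
    intro i hi
    rw [PySem.List.mem_pyRange_one] at hi
    obtain ⟨h0, h1⟩ := hi
    rw [PySem.List.len_eq] at h1
    have him : i = ((i.toNat : Nat) : Int) := (Int.toNat_of_nonneg h0).symm
    set m := i.toNat with hmdef
    have hm : m < polygon.length := by omega
    have hm2 : (m + 1) % polygon.length < polygon.length := Nat.mod_lt _ (by omega)
    have hOKm := hOK m hm
    simp only [pvEdgeOK] at hOKm
    split at hOKm
    next => exact absurd hOKm (by simp)
    next e heq =>
      rw [Bool.and_eq_true, decide_eq_true_eq] at hOKm
      have kv1 : pvV1 polygon i = polygon.getD m 0 := by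
        unfold pvV1
        rw [him, PySem.List.pyGet?_natCast]
        exact List.getD_eq_getElem?_getD.symm
      have kv2 : pvV2 polygon (PySem.List.len polygon) i =
          polygon.getD ((m + 1) % polygon.length) 0 := by
        unfold pvV2
        have hc1 : (i + 1 : Int) = ((m + 1 : Nat) : Int) := by omega
        rw [hc1, PySem.List.len_eq, PySem.Int.mod_natCast, PySem.List.pyGet?_natCast]
        exact List.getD_eq_getElem?_getD.symm
      have kE : pvE polygon (PySem.List.len polygon) (pvEdgeIndexDict edge_index) i = e := by
        unfold pvE
        rw [kv1, kv2, heq]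
        rfl
      refine ⟨⟨?_, ?_, ?_, ?_⟩, ?_⟩
      · rw [him, PySem.List.pyGet?_natCast]
        simp [hm]
      · have hc1 : (i + 1 : Int) = ((m + 1 : Nat) : Int) := by omega
        rw [hc1, PySem.List.len_eq, PySem.Int.mod_natCast, PySem.List.pyGet?_natCast]
        simp [hm2]
      · rw [kv1, kv2, heq]
        rfl
      · rw [kE]; exact hOKm.2
      · rw [kE]; exact hOKm.1
  set n : Int := PySem.List.len polygon with hn
  set ei := pvEdgeIndexDict edge_index with hei
  set ev0 : PySem.Dict Int (List Int) := PySem.Dict.mk edge_vars with hev0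
  set S : List (Int × Int × Int) :=
    (PySem.List.pyRange 0 n 1).map
      (fun i => (pvV1 polygon i, pvV2 polygon n i, pvE polygon n ei i)) with hS
  have hCondS : pvCondS edges ev0 S := by
    intro s hs
    rw [hS, List.mem_map] at hs
    obtain ⟨i, hi, rfl⟩ := hs
    obtain ⟨⟨_, _, _, hrange⟩, hcont⟩ := Hcond i hi
    constructor
    · rcases hx : PySem.List.pyGet? edges (pvE polygon n ei i) with _ | _
      · exact absurd hrange (by simpa using (PySem.List.pyGet?_eq_none_iff _ _).mp hx)
      · rfl
    · rw [← PySem.Dict.contains_eq_isSome_get?]; exact hcont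
  have hOvEmpty : pvOv ev0 (PySem.Dict.mk []) ev0 := by
    intro k; rfl
  -- the clockwise map is S itself, the counterclockwise map is S with flipped pairs
  have hmapF : S.map (fun s => if (false : Bool) = true then (s.2.1, s.1, s.2.2) else s) = S := by
    simp
  have hmapT : S.map (fun s => if (true : Bool) = true then (s.2.1, s.1, s.2.2) else s) =
      (PySem.List.pyRange 0 n 1).map
        (fun i => (pvV2 polygon n i, pvV1 polygon i, pvE polygon n ei i)) := by
    rw [hS, List.map_map]; rfl
  obtain ⟨b1, ev1, n1, p1, hT1, hD1⟩ :=
    pvTry_eq_dirRun edges ev0 false S ev0 (PySem.Dict.mk []) [] hOvEmpty hCondS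
  rw [hmapF] at hT1
  simp only [can_form_cycle_dfs, can_form_cycle_dfs_alt, ← hn, ← hei, ← hev0]
  rw [pvBuild_spec polygon n ei edges _ [] [] (fun i hi => (Hcond i hi).1),
      pvMkSteps_spec polygon n ei edges _ [] (fun i hi => (Hcond i hi).1)]
  simp only [List.nil_append, ← hS]
  rw [hT1]
  cases b1 with
  | true =>
    -- clockwise succeeds: A returns true; B's cw flag is true
    obtain ⟨b2, ev2, n2, p2, _, hD2⟩ :=
      pvTry_eq_dirRun edges ev0 true S ev0 (PySem.Dict.mk []) [] hOvEmpty hCondS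
    rw [pvFused_eq_pair edges ev0 S _ _ _ _ _ _ _ _ hD1 hD2]
    rfl
  | false =>
    -- clockwise failed: A resets (= the snapshot ev0) and tries counterclockwise
    obtain ⟨Δ, hΔeq, _, hreset⟩ := pvTryPath_reset edges _ ev0 ev1 [] n1 false hnd0 hT1
    simp only [List.nil_append] at hΔeq
    obtain ⟨b2, ev2, n2, p2, hT2, hD2⟩ :=
      pvTry_eq_dirRun edges ev0 true S ev0 (PySem.Dict.mk []) n1 hOvEmpty hCondS
    rw [hmapT] at hT2
    rw [pvFused_eq_pair edges ev0 S _ _ _ _ _ _ _ _ hD1 hD2]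
    dsimp only
    rw [hΔeq] at hT2
    rw [hΔeq, hreset, hT2]
    rfl
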